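-- pv_equiv track=rewrite | github.com/MrBrantCode/unitest_baseline | mut_generate/mist_train_cf/cf_81073/solution.py | stepNum
-- ===== SOURCE A (Python) =====
-- import collections
--
-- def stepNum(low, high):
--     result = dict()
--     queue = collections.deque()
--     for i in range(1, 10):
--         queue.append(i)
--
--     if low == 0:
--         result[0] = 0
--
--     while queue:
--         num = queue.popleft()
--
--         if low <= num <= high:
--             result[num] = sum([int(i) for i in str(num)])
--
--         last_digit = num % 10
--         numA = num * 10 + (last_digit-1)
--         numB = num * 10 + (last_digit+1)
--
--         if last_digit == 0 and numB <= high: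
--             queue.append(numB)
--         elif last_digit == 9 and numA <= high:
--             queue.append(numA)
--         else:
--             if numA <= high:
--                 queue.append(numA)
--             if numB <= high:
--                 queue.append(numB)
--
--     return result
-- ===== SOURCE B (Python) =====
-- def stepNum(low, high):
--     result = dict()
--     if low == 0:
--         result[0] = 0
--     nums = []
--     def go(n):
--         if n > high:
--             return
--         nums.append(n)
--         d = n % 10
--         if d > 0:
--             go(n * 10 + d - 1)
--         if d < 9:
--             go(n * 10 + d + 1)
--     for i in range(1, 10):
--         go(i)
--     for n in sorted(nums):
--         if n >= low:
--             result[n] = sum([int(i) for i in str(n)])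
--     return result
-- ===== Notes on version B (the rewrite author's own statement) =====
-- stated objective: alternative
-- what changed: B replaces A's deque-driven BFS over the stepping-number tree by a recursive DFS that collects the numbers, sorts the collected list once, and builds the result dict from the sorted list; it also drops A's elif/else re-test of numA after the last_digit==0 branch fails, which is A's bug.
-- intended difference: When high equals 10*m-1 or 10*m for a stepping number m ending in digit 0 (e.g. high in {99,100} with m=10) and low <= 10*m-1, A also records the non-stepping key 10*m-1 (its elif chain re-tests numA after 'last_digit == 0 and numB <= high' fails and appends num*10-1, whose trailing digits are 9 after a 0); B returns the dict without that key, which is the intended set of stepping numbers. — e.g. on stepNum(90, 100): A returns [(98, 17), (99, 18)], B returns [(98, 17)]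
import Mathlib
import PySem

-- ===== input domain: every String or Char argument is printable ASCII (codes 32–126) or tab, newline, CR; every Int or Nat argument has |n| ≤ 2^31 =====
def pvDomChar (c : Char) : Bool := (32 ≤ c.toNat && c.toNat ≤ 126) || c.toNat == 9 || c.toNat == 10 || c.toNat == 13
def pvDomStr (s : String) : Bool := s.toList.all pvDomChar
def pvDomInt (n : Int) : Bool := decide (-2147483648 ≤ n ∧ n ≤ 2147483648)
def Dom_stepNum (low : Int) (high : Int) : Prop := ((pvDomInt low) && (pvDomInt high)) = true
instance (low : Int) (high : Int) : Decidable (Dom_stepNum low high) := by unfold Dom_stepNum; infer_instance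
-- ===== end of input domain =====

-- B replaces A's deque BFS by a recursive DFS that collects the numbers, sorts them once and
-- builds the dict from the sorted list (objective: alternative; A's BFS emits keys in the same
-- increasing order, which is what the equivalence below proves).

-- ===== PORT A =====
-- sum([int(i) for i in str(num)])  (both programs apply it to non-negative numbers only)
def pvDigitSum (num : Int) : Int :=
  ((PySem.Int.toChars num).map (fun c => (PySem.Int.ofChars? [c]).getD 0)).sum

-- the while-loop of A; the fuel only totalizes the loop
def pvBfsLoop (low : Int) (high : Int) : Nat → List Int → PySem.Dict Int Int → PySem.Dict Int Int
  | 0, _, r => r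
  | _ + 1, [], r => r
  | fuel + 1, num :: queue, r =>
    let r := if low ≤ num ∧ num ≤ high then r.insert num (pvDigitSum num) else r
    let last_digit := PySem.Int.mod num 10
    let numA := num * 10 + (last_digit - 1)
    let numB := num * 10 + (last_digit + 1)
    let queue :=
      if last_digit = 0 ∧ numB ≤ high then queue ++ [numB]
      else if last_digit = 9 ∧ numA ≤ high then queue ++ [numA]
      else (queue ++ (if numA ≤ high then [numA] else [])) ++ (if numB ≤ high then [numB] else [])
    pvBfsLoop low high fuel queue r

def stepNum (low : Int) (high : Int) : List (Int × Int) :=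
  let result : PySem.Dict Int Int := PySem.Dict.empty
  let queue : List Int := PySem.List.pyRange 1 10 1
  let result := if low = 0 then result.insert 0 0 else result
  (pvBfsLoop low high (3 ^ 40) queue result).items

-- ===== PORT B =====
-- def go(n): the DFS collector of Source B; the fuel only totalizes the recursion
def pvGo (high : Int) : Nat → Int → List Int
  | 0, _ => []
  | fuel + 1, n =>
    if n > high then []
    else
      let d := PySem.Int.mod n 10
      n :: ((if d > 0 then pvGo high fuel (n * 10 + d - 1) else []) ++
            (if d < 9 then pvGo high fuel (n * 10 + d + 1) else []))

def stepNum_alt (low : Int) (high : Int) : List (Int × Int) :=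
  let result : PySem.Dict Int Int :=
    if low = 0 then PySem.Dict.empty.insert 0 0 else PySem.Dict.empty
  let nums : List Int := (PySem.List.pyRange 1 10 1).flatMap (fun i => pvGo high (3 ^ 40) i)
  ((PySem.List.sorted nums (fun x => x) false).foldl
      (fun r n => if n ≥ low then r.insert n (pvDigitSum n) else r) result).items

-- ===== PRECONDITION & SPEC =====
-- "n is a stepping number": adjacent decimal digits differ by exactly 1 (fuelled structurally)
def pvSteppingAux : Nat → Nat → Bool
  | 0, _ => false
  | f + 1, n => if n < 10 then n != 0 else ((n / 10 % 10).dist (n % 10) == 1) && pvSteppingAux f (n / 10)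

def pvStepping (n : Nat) : Bool := pvSteppingAux n n

-- When high = 10*m - 1 or high = 10*m for a stepping number m ending in the digit 0 and
-- low ≤ 10*m - 1, A records the non-stepping key 10*m - 1 (after `last_digit == 0 and numB <= high`
-- fails, its elif/else chain re-tests numA = num*10 - 1 and appends it); B returns the dict
-- without that key, which is the intended value.
def D_stepNum (low : Int) (high : Int) : Prop :=
  (PySem.Int.mod high 10 = 9 ∨ PySem.Int.mod high 10 = 0) ∧
  (let m := PySem.Int.floordiv (high + 1) 10
   10 ≤ m ∧ PySem.Int.mod m 10 = 0 ∧ pvStepping m.toNat = true ∧ low ≤ 10 * m - 1)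
instance (low : Int) (high : Int) : Decidable (D_stepNum low high) := by
  unfold D_stepNum; infer_instance

def Spec_stepNum (low : Int) (high : Int) (out : List (Int × Int)) : Prop :=
  ¬ D_stepNum low high → out = stepNum_alt low high
instance (low : Int) (high : Int) (out : List (Int × Int)) : Decidable (Spec_stepNum low high out) := by
  unfold Spec_stepNum; infer_instance

def pvDiffWitness_stepNum : Int × Int := (90, 100)
def pvDiffWitnessOut_stepNum : (List (Int × Int)) × (List (Int × Int)) :=
  ([(98, 17), (99, 18)], [(98, 17)])

-- ===== CLAIM (what is proved, stated in full; the proofs are below) =====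
def Claim_unchanged_stepNum : Prop := ∀ (low : Int) (high : Int), Dom_stepNum low high → Spec_stepNum low high (stepNum low high)
def Claim_exact_stepNum : Prop := ∀ (low : Int) (high : Int), Dom_stepNum low high → D_stepNum low high → stepNum low high ≠ stepNum_alt low high
def Claim_changed_stepNum : Prop := Dom_stepNum (pvDiffWitness_stepNum.1) (pvDiffWitness_stepNum.2) ∧ D_stepNum (pvDiffWitness_stepNum.1) (pvDiffWitness_stepNum.2) ∧ stepNum (pvDiffWitness_stepNum.1) (pvDiffWitness_stepNum.2) = pvDiffWitnessOut_stepNum.1 ∧ stepNum_alt (pvDiffWitness_stepNum.1) (pvDiffWitness_stepNum.2) = pvDiffWitnessOut_stepNum.2 ∧ pvDiffWitnessOut_stepNum.1 ≠ pvDiffWitnessOut_stepNum.2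

-- ===== LEMMAS AND PROOFS =====

-- fuel does not matter for pvSteppingAux once it is at least n

theorem pvSteppingAux_stable : ∀ (f g n : Nat), 1 ≤ n → n ≤ f → n ≤ g →
    pvSteppingAux f n = pvSteppingAux g n := by
  intro f
  induction f with
  | zero => intro g n h1 h2; omega
  | succ f ih =>
    intro g n h1 h2 h3
    match g with
    | 0 => omega
    | g + 1 =>
      show pvSteppingAux (f+1) n = pvSteppingAux (g+1) n
      simp only [pvSteppingAux]
      by_cases h : n < 10
      · simp [h]
      · simp only [if_neg h]
        rw [ih g (n / 10) (by omega) (by omega) (by omega)]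

theorem pvStepping_small {n : Nat} (h1 : 1 ≤ n) (h : n < 10) : pvStepping n = true := by
  unfold pvStepping
  match n, h1 with
  | (m+1), _ => simp only [pvSteppingAux, if_pos h]; simp

theorem pvStepping_step {n : Nat} (h : 10 ≤ n) :
    pvStepping n = (((n / 10 % 10).dist (n % 10) == 1) && pvStepping (n / 10)) := by
  unfold pvStepping
  match n, h with
  | (m+1), h =>
    simp only [pvSteppingAux, if_neg (by omega : ¬ m + 1 < 10)]
    rw [pvSteppingAux_stable m ((m+1)/10) ((m+1)/10) (by omega) (by omega) (by omega)]

theorem pvStepping_child {n d : Int} (hn : 1 ≤ n) (hs : pvStepping n.toNat = true)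
    (hd0 : 0 ≤ d) (hd9 : d ≤ 9) (hadj : d + 1 = n % 10 ∨ n % 10 + 1 = d) :
    pvStepping (n * 10 + d).toNat = true := by
  have h1 : (n * 10 + d).toNat = n.toNat * 10 + d.toNat := by omega
  rw [h1, pvStepping_step (by omega)]
  have h2 : (n.toNat * 10 + d.toNat) % 10 = d.toNat := by omega
  have h3 : (n.toNat * 10 + d.toNat) / 10 = n.toNat := by omega
  rw [h2, h3, hs, Bool.and_true]
  have h5 : (n.toNat % 10).dist d.toNat = 1 := by
    simp only [Nat.dist]; omega
  simp [h5]

-- the child list A's loop body appends for a popped num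
def pvCh (high : Int) (num : Int) : List Int :=
  let last_digit := PySem.Int.mod num 10
  let numA := num * 10 + (last_digit - 1)
  let numB := num * 10 + (last_digit + 1)
  if last_digit = 0 ∧ numB ≤ high then [numB]
  else if last_digit = 9 ∧ numA ≤ high then [numA]
  else (if numA ≤ high then [numA] else []) ++ (if numB ≤ high then [numB] else [])

theorem pvCh_facts {high num c : Int} (_h1 : 1 ≤ num) (hc : c ∈ pvCh high num) :
    c ≤ high ∧ num * 10 + (num % 10) - 1 ≤ c ∧ c ≤ num * 10 + (num % 10) + 1 ∧
      (num % 10 = 9 → c ≤ num * 10 + 8) ∧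
      (num * 10 ≤ c ∨ (c = num * 10 - 1 ∧ num % 10 = 0)) := by
  have hm : PySem.Int.mod num 10 = num % 10 := PySem.Int.mod_eq_emod_of_pos (by norm_num)
  have h0 : 0 ≤ num % 10 := Int.emod_nonneg num (by norm_num)
  have h9 : num % 10 < 10 := Int.emod_lt_of_pos num (by norm_num)
  simp only [pvCh, hm] at hc
  split_ifs at hc with c1 c2 c3 c4 <;>
    simp only [List.mem_append, List.mem_cons,
      List.not_mem_nil, or_false] at hc <;> omega

theorem pvCh_nil {high num : Int} (h1 : 1 ≤ num) (h2 : high < num) : pvCh high num = [] := by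
  rw [List.eq_nil_iff_forall_not_mem]
  intro c hc
  have := pvCh_facts h1 hc
  have h0 : 0 ≤ num % 10 := Int.emod_nonneg num (by norm_num)
  omega

-- visit order of A's BFS
def pvVisit (high : Int) : Nat → List Int → List Int
  | 0, _ => []
  | _ + 1, [] => []
  | fuel + 1, num :: queue => num :: pvVisit high fuel (queue ++ pvCh high num)

-- A's loop is the conditional-insert fold over its visit order
theorem pvBfs_foldl (low high : Int) : ∀ (fuel : Nat) (q : List Int) (r : PySem.Dict Int Int),
    pvBfsLoop low high fuel q r =
      (pvVisit high fuel q).foldl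
        (fun d n => if low ≤ n ∧ n ≤ high then d.insert n (pvDigitSum n) else d) r := by
  intro fuel
  induction fuel with
  | zero => intro q r; simp [pvBfsLoop, pvVisit]
  | succ fuel ih =>
    intro q r
    cases q with
    | nil => simp [pvBfsLoop, pvVisit]
    | cons num queue =>
      simp only [pvBfsLoop, pvVisit, List.foldl_cons]
      rw [ih]
      congr 1
      simp only [pvCh]
      split_ifs <;> simp [List.append_assoc]

-- a conditional-insert fold is the plain insert fold over the filtered list
theorem pvFoldl_filter (p : Int → Prop) [DecidablePred p] (f : Int → Int) :
    ∀ (l : List Int) (r : PySem.Dict Int Int),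
      l.foldl (fun d n => if p n then d.insert n (f n) else d) r =
        (l.filter (fun n => decide (p n))).foldl (fun d n => d.insert n (f n)) r := by
  intro l
  induction l with
  | nil => intro r; rfl
  | cons a l ih =>
    intro r
    by_cases h : p a <;> simp [h, ih]

-- every visited number is at least some queue element
theorem pvVisit_ge (high : Int) : ∀ (fuel : Nat) (q : List Int), (∀ e ∈ q, 1 ≤ e) →
    ∀ m ∈ pvVisit high fuel q, ∃ e ∈ q, e ≤ m := by
  intro fuel
  induction fuel with
  | zero => intro q _ m hm; simp [pvVisit] at hm
  | succ fuel ih =>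
    intro q hpos m hm
    cases q with
    | nil => simp [pvVisit] at hm
    | cons x queue =>
      simp only [pvVisit, List.mem_cons] at hm
      rcases hm with rfl | hm
      · exact ⟨m, List.mem_cons_self, le_refl m⟩
      · have hx : 1 ≤ x := hpos x List.mem_cons_self
        have hpos' : ∀ e ∈ queue ++ pvCh high x, 1 ≤ e := by
          intro e he
          rcases List.mem_append.1 he with he | he
          · exact hpos e (List.mem_cons_of_mem _ he)
          · have hf := pvCh_facts hx he
            have h0 : 0 ≤ x % 10 := Int.emod_nonneg x (by norm_num)
            omega
        obtain ⟨e, he, hem⟩ := ih (queue ++ pvCh high x) hpos' m hm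
        rcases List.mem_append.1 he with he | he
        · exact ⟨e, List.mem_cons_of_mem _ he, hem⟩
        · have hf := pvCh_facts hx he
          have h0 : 0 ≤ x % 10 := Int.emod_nonneg x (by norm_num)
          exact ⟨x, List.mem_cons_self, by omega⟩

-- the BFS queue invariant
def pvInv (q : List Int) : Prop :=
  q.Pairwise (· < ·) ∧ (∀ e ∈ q, 1 ≤ e) ∧
    (∀ h t, q = h :: t → ∀ e ∈ t, e < 10 * h + h % 10 - 1)

theorem pvInv_step {high x : Int} {q : List Int} (hInv : pvInv (x :: q)) :
    pvInv (q ++ pvCh high x) := by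
  obtain ⟨hp, hpos, hhd⟩ := hInv
  have hx : 1 ≤ x := hpos x List.mem_cons_self
  have h0 : 0 ≤ x % 10 := Int.emod_nonneg x (by norm_num)
  have h9 : x % 10 < 10 := Int.emod_lt_of_pos x (by norm_num)
  have hqlt : ∀ e ∈ q, x < e := fun e he => (List.pairwise_cons.1 hp).1 e he
  have hqbd : ∀ e ∈ q, e < 10 * x + x % 10 - 1 := fun e he => hhd x q rfl e he
  have hchPW : (pvCh high x).Pairwise (· < ·) := by
    have hm : PySem.Int.mod x 10 = x % 10 := PySem.Int.mod_eq_emod_of_pos (by norm_num)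
    simp only [pvCh, hm]
    split_ifs <;> simp [List.pairwise_cons]
  refine ⟨List.pairwise_append.2 ⟨(List.pairwise_cons.1 hp).2, hchPW, ?_⟩, ?_, ?_⟩
  · intro a ha b hb
    have hf := pvCh_facts hx hb
    have := hqbd a ha
    omega
  · intro e he
    rcases List.mem_append.1 he with he | he
    · exact hpos e (List.mem_cons_of_mem _ he)
    · have hf := pvCh_facts hx he; omega
  · intro h t heq e he
    cases q with
    | cons y t' =>
      rw [List.cons_append] at heq
      obtain ⟨rfl, rfl⟩ := List.cons.inj heq
      have hy : x < y := hqlt y List.mem_cons_self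
      have hly : 0 ≤ y % 10 := Int.emod_nonneg y (by norm_num)
      have hly9 : y % 10 < 10 := Int.emod_lt_of_pos y (by norm_num)
      rcases List.mem_append.1 he with he | he
      · have := hqbd e (List.mem_cons_of_mem _ he)
        omega
      · have hf := pvCh_facts hx he
        omega
    | nil =>
      simp only [List.nil_append] at heq
      have hh : h ∈ pvCh high x := heq ▸ List.mem_cons_self
      have heCh : e ∈ pvCh high x := heq ▸ List.mem_cons_of_mem _ he
      have hf1 := pvCh_facts hx hh
      have hf2 := pvCh_facts hx heCh
      have hly : 0 ≤ h % 10 := Int.emod_nonneg h (by norm_num)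
      omega

theorem pvVisit_sorted (high : Int) : ∀ (fuel : Nat) (q : List Int), pvInv q →
    (pvVisit high fuel q).Pairwise (· < ·) := by
  intro fuel
  induction fuel with
  | zero => intro q _; simp [pvVisit]
  | succ fuel ih =>
    intro q hInv
    cases q with
    | nil => simp [pvVisit]
    | cons x queue =>
      have hx : 1 ≤ x := hInv.2.1 x List.mem_cons_self
      have hInv' := pvInv_step (high := high) hInv
      simp only [pvVisit, List.pairwise_cons]
      refine ⟨?_, ih _ hInv'⟩
      intro m hm
      obtain ⟨e, he, hem⟩ := pvVisit_ge high fuel _ hInv'.2.1 m hm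
      rcases List.mem_append.1 he with he | he
      · have := (List.pairwise_cons.1 hInv.1).1 e he; omega
      · have hf := pvCh_facts hx he
        have h0 : 0 ≤ x % 10 := Int.emod_nonneg x (by norm_num)
        omega

-- termination weight for the BFS
def pvWt (high n : Int) : Nat :=
  (2 * Nat.log 10 high.toNat + 3) - (2 * Nat.log 10 n.toNat + (if n % 10 = 9 then 1 else 0))

def pvMQ (high : Int) (q : List Int) : Nat := (q.map (fun n => 3 ^ pvWt high n)).sum

theorem pvLog_child {x c : Int} (hx : 1 ≤ x) (h : 10 * x ≤ c) :
    Nat.log 10 x.toNat + 1 ≤ Nat.log 10 c.toNat := by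
  have h1 : x.toNat * 10 ≤ c.toNat := by omega
  calc Nat.log 10 x.toNat + 1 = Nat.log 10 (x.toNat * 10) :=
        (Nat.log_mul_base (by norm_num) (by omega)).symm
    _ ≤ Nat.log 10 c.toNat := Nat.log_mono_right h1

theorem pvWt_lt {high x c : Int} (hx : 1 ≤ x) (hc : c ∈ pvCh high x) :
    pvWt high c < pvWt high x := by
  have hf := pvCh_facts hx hc
  have h0 : 0 ≤ x % 10 := Int.emod_nonneg x (by norm_num)
  have h9 : x % 10 < 10 := Int.emod_lt_of_pos x (by norm_num)
  have hcpos : 1 ≤ c := by omega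
  have hhigh : Nat.log 10 c.toNat ≤ Nat.log 10 high.toNat :=
    Nat.log_mono_right (by omega)
  unfold pvWt
  rcases hf.2.2.2.2 with h10 | ⟨hceq, hx0⟩
  · have hlog := pvLog_child (c := c) hx (by omega)
    split_ifs <;> omega
  · have hc9 : c % 10 = 9 := by omega
    have hx9 : ¬ (x % 10 = 9) := by omega
    have hlog : Nat.log 10 x.toNat ≤ Nat.log 10 c.toNat :=
      Nat.log_mono_right (by omega)
    rw [if_pos hc9, if_neg hx9]
    omega

theorem pvMQ_dec {high x : Int} (hx : 1 ≤ x) (q : List Int) :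
    pvMQ high (q ++ pvCh high x) < pvMQ high (x :: q) := by
  have hbd : ∀ c ∈ pvCh high x, pvWt high c < pvWt high x := fun c hc => pvWt_lt hx hc
  have hlen : (pvCh high x).length ≤ 2 := by
    simp only [pvCh]; split_ifs <;> simp
  have hkey : pvMQ high (pvCh high x) < 3 ^ pvWt high x := by
    have hw1 : ∀ a, a < pvWt high x → 3 ^ a ≤ 3 ^ (pvWt high x - 1) :=
      fun a ha => Nat.pow_le_pow_right (by norm_num) (by omega)
    rcases hch : pvCh high x with _ | ⟨a, _ | ⟨b, _ | ⟨e, t⟩⟩⟩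
    · simp only [pvMQ, List.map_nil, List.sum_nil]
      positivity
    · have ha := hbd a (by rw [hch]; exact List.mem_cons_self)
      have := hw1 _ ha
      have hpow : (1:Nat) ≤ 3 ^ (pvWt high x - 1) := Nat.one_le_two_pow.trans (by
        exact Nat.pow_le_pow_left (by norm_num) _)
      have hx3 : 3 ^ pvWt high x = 3 ^ (pvWt high x - 1) * 3 := by
        rw [← Nat.pow_succ]; congr 1; omega
      simp only [pvMQ, List.map_cons, List.map_nil, List.sum_cons, List.sum_nil]
      omega
    · have ha := hbd a (by rw [hch]; exact List.mem_cons_self)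
      have hb := hbd b (by rw [hch]; exact List.mem_cons_of_mem _ List.mem_cons_self)
      have h1 := hw1 _ ha
      have h2 := hw1 _ hb
      have hx3 : 3 ^ pvWt high x = 3 ^ (pvWt high x - 1) * 3 := by
        rw [← Nat.pow_succ]; congr 1; omega
      have hpow : (1:Nat) ≤ 3 ^ (pvWt high x - 1) := Nat.one_le_two_pow.trans (by
        exact Nat.pow_le_pow_left (by norm_num) _)
      simp only [pvMQ, List.map_cons, List.map_nil, List.sum_cons, List.sum_nil]
      omega
    · rw [hch] at hlen; simp at hlen
  simp only [pvMQ, List.map_append, List.sum_append, List.map_cons, List.sum_cons] at *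
  omega

-- the ideal (fuel-free) DFS over A's generation tree
def pvDfsA (high : Int) (n : Int) : List Int :=
  if _h : n < 1 then [] else n :: ((pvCh high n).attach.flatMap (fun c => pvDfsA high c.1))
termination_by (high + 1 - n).toNat
decreasing_by
  have hf := pvCh_facts (by omega) c.2
  omega

theorem pvDfsA_eq {high n : Int} (h : 1 ≤ n) :
    pvDfsA high n = n :: (pvCh high n).flatMap (pvDfsA high) := by
  rw [pvDfsA, dif_neg (by omega)]
  simp only [List.flatMap_subtype, List.unattach_attach]

-- with enough fuel, the BFS visit order is a permutation of the DFS visit order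
theorem pvVisit_perm (high : Int) : ∀ (fuel : Nat) (q : List Int), (∀ e ∈ q, 1 ≤ e) →
    pvMQ high q ≤ fuel → (pvVisit high fuel q).Perm (q.flatMap (pvDfsA high)) := by
  intro fuel
  induction fuel with
  | zero =>
    intro q hpos hMQ
    cases q with
    | nil => simp [pvVisit]
    | cons x q' =>
      exfalso
      have : (1:Nat) ≤ 3 ^ pvWt high x := Nat.one_le_pow _ _ (by norm_num)
      simp only [pvMQ, List.map_cons, List.sum_cons] at hMQ
      omega
  | succ fuel ih =>
    intro q hpos hMQ
    cases q with
    | nil => simp [pvVisit]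
    | cons x q' =>
      have hx : 1 ≤ x := hpos x List.mem_cons_self
      have hpos' : ∀ e ∈ q' ++ pvCh high x, 1 ≤ e := by
        intro e he
        rcases List.mem_append.1 he with he | he
        · exact hpos e (List.mem_cons_of_mem _ he)
        · have hf := pvCh_facts hx he
          have h0 : 0 ≤ x % 10 := Int.emod_nonneg x (by norm_num)
          omega
      have hMQ' : pvMQ high (q' ++ pvCh high x) ≤ fuel := by
        have := pvMQ_dec (high := high) hx q'
        omega
      have h1 := ih (q' ++ pvCh high x) hpos' hMQ'
      rw [List.flatMap_append] at h1
      show (x :: pvVisit high fuel (q' ++ pvCh high x)).Perm ((x :: q').flatMap (pvDfsA high))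
      rw [List.flatMap_cons, pvDfsA_eq hx, List.cons_append]
      exact (h1.trans List.perm_append_comm).cons x

-- the ideal (fuel-free) DFS of B
def pvDfsB (high : Int) (n : Int) : List Int :=
  if n < 1 ∨ high < n then []
  else n :: ((if n % 10 > 0 then pvDfsB high (n * 10 + n % 10 - 1) else []) ++
             (if n % 10 < 9 then pvDfsB high (n * 10 + n % 10 + 1) else []))
termination_by (high + 1 - n).toNat
decreasing_by all_goals omega

theorem pvGo_eq (high : Int) : ∀ (fuel : Nat) (n : Int), 1 ≤ n →
    Nat.log 10 high.toNat + 2 ≤ fuel + Nat.log 10 n.toNat →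
    pvGo high fuel n = pvDfsB high n := by
  intro fuel
  induction fuel with
  | zero =>
    intro n h1 hf
    rw [pvDfsB]
    have hnh : high < n := by
      by_contra hcon
      have : Nat.log 10 n.toNat ≤ Nat.log 10 high.toNat := Nat.log_mono_right (by omega)
      omega
    rw [if_pos (Or.inr hnh)]
    rfl
  | succ fuel ih =>
    intro n h1 hf
    have hm : PySem.Int.mod n 10 = n % 10 := PySem.Int.mod_eq_emod_of_pos (by norm_num)
    have h0 : 0 ≤ n % 10 := Int.emod_nonneg n (by norm_num)
    have h9 : n % 10 < 10 := Int.emod_lt_of_pos n (by norm_num)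
    rw [pvDfsB]
    simp only [pvGo, hm]
    by_cases hnh : n > high
    · rw [if_pos hnh, if_pos (Or.inr hnh)]
    · rw [if_neg hnh, if_neg (by omega : ¬ (n < 1 ∨ high < n))]
      have hstep : ∀ d : Int, 0 ≤ d → d ≤ 9 → 10 * n ≤ n * 10 + d →
          pvGo high fuel (n * 10 + d) = pvDfsB high (n * 10 + d) := by
        intro d hd0 hd9 hge
        apply ih _ (by omega)
        have := pvLog_child h1 hge
        omega
      congr 1
      congr 1
      · split_ifs with hgt
        · rw [show n * 10 + n % 10 - 1 = n * 10 + (n % 10 - 1) by ring]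
          exact hstep (n % 10 - 1) (by omega) (by omega) (by omega)
        · rfl
      · split_ifs with hlt
        · rw [show n * 10 + n % 10 + 1 = n * 10 + (n % 10 + 1) by ring]
          exact hstep (n % 10 + 1) (by omega) (by omega) (by omega)
        · rfl

-- the heart: outside D_, node for node, A's recorded keys are B's recorded keys

theorem pvDfsB_nil {high n : Int} (hn : high < n) : pvDfsB high n = [] := by
  rw [pvDfsB, if_pos (Or.inr hn)]

theorem pvNode_gt {low high n : Int} (h1 : 1 ≤ n) (hn : high < n) :
    (pvDfsA high n).filter (fun m => decide (low ≤ m ∧ m ≤ high)) =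
      (pvDfsB high n).filter (fun m => decide (low ≤ m)) := by
  rw [pvDfsA_eq h1, pvCh_nil h1 hn, pvDfsB_nil hn]
  simp [not_le.2 hn]

theorem pvNode_eq {low high : Int} (hD : ¬ D_stepNum low high) :
    ∀ (k : Nat) (n : Int), (high + 1 - n).toNat ≤ k → 1 ≤ n → pvStepping n.toNat = true →
      (pvDfsA high n).filter (fun m => decide (low ≤ m ∧ m ≤ high)) =
        (pvDfsB high n).filter (fun m => decide (low ≤ m)) := by
  intro k
  induction k with
  | zero =>
    intro n hk h1 _
    exact pvNode_gt h1 (by omega)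
  | succ k ih =>
    intro n hk h1 hs
    by_cases hnh : high < n
    · exact pvNode_gt h1 hnh
    · have hnle : n ≤ high := not_lt.1 hnh
      have h0 : 0 ≤ n % 10 := Int.emod_nonneg n (by norm_num)
      have h9 : n % 10 < 10 := Int.emod_lt_of_pos n (by norm_num)
      have hm : PySem.Int.mod n 10 = n % 10 := PySem.Int.mod_eq_emod_of_pos (by norm_num)
      have hchild : ∀ d : Int, 0 ≤ d → d ≤ 9 → (d + 1 = n % 10 ∨ n % 10 + 1 = d) →
          (pvDfsA high (n * 10 + d)).filter (fun m => decide (low ≤ m ∧ m ≤ high)) =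
            (pvDfsB high (n * 10 + d)).filter (fun m => decide (low ≤ m)) := by
        intro d hd0 hd9 hadj
        exact ih (n * 10 + d) (by omega) (by omega) (pvStepping_child h1 hs hd0 hd9 hadj)
      -- the one genuinely wrong branch of A: last digit 0, numB > high, numA ≤ high
      have hbug : n % 10 = 0 → n * 10 - 1 ≤ high → high < n * 10 + 1 → ¬ low ≤ n * 10 - 1 := by
        intro hl0 hA hB hlow
        apply hD
        have hmh : PySem.Int.mod high 10 = high % 10 :=
          PySem.Int.mod_eq_emod_of_pos (by norm_num)
        have hfd1 : PySem.Int.floordiv (high + 1) 10 = (high + 1) / 10 :=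
          PySem.Int.floordiv_eq_ediv_of_pos (by norm_num)
        unfold D_stepNum
        rw [hmh, hfd1]
        have hmn : (high + 1) / 10 = n := by omega
        rw [hmn]
        exact ⟨by omega, by omega, by omega, hs, by omega⟩
      rw [pvDfsA_eq h1, pvDfsB, if_neg (by omega : ¬ (n < 1 ∨ high < n))]
      simp only [List.filter_cons]
      have hhead : decide (low ≤ n ∧ n ≤ high) = decide (low ≤ n) := by
        by_cases h : low ≤ n <;> simp [h, hnle]
      have htail : ((pvCh high n).flatMap (pvDfsA high)).filter
            (fun m => decide (low ≤ m ∧ m ≤ high)) =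
          ((if n % 10 > 0 then pvDfsB high (n * 10 + n % 10 - 1) else []) ++
           (if n % 10 < 9 then pvDfsB high (n * 10 + n % 10 + 1) else [])).filter
            (fun m => decide (low ≤ m)) := by
        have eA : n * 10 + n % 10 - 1 = n * 10 + (n % 10 - 1) := by ring
        have eB : n * 10 + n % 10 + 1 = n * 10 + (n % 10 + 1) := by ring
        simp only [pvCh, hm, eA, eB, List.filter_append]
        by_cases hl0 : n % 10 = 0
        · have hng : ¬ ((0:Int) < n % 10) := by omega
          rw [if_neg hng]
          by_cases hB : n * 10 + (n % 10 + 1) ≤ high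
          · rw [if_pos ⟨hl0, hB⟩, if_pos (show (n % 10 : Int) < 9 by omega)]
            simp only [List.flatMap_cons, List.flatMap_nil, List.append_nil,
              List.filter_nil, List.nil_append]
            exact hchild (n % 10 + 1) (by omega) (by omega) (by omega)
          · rw [if_neg (fun hc => hB hc.2),
              if_neg (show ¬ (n % 10 = 9 ∧ n * 10 + (n % 10 - 1) ≤ high) by omega),
              if_pos (show (n % 10 : Int) < 9 by omega),
              pvDfsB_nil (show high < n * 10 + (n % 10 + 1) by omega)]
            by_cases hA : n * 10 + (n % 10 - 1) ≤ high
            · rw [if_pos hA, if_neg (show ¬ n * 10 + (n % 10 + 1) ≤ high from hB)]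
              simp only [List.append_nil, List.flatMap_cons, List.flatMap_nil]
              have hA1 : (1:Int) ≤ n * 10 + (n % 10 - 1) := by omega
              have hchnil : pvCh high (n * 10 + (n % 10 - 1)) = [] := by
                rw [List.eq_nil_iff_forall_not_mem]
                intro c hc
                have hf := pvCh_facts hA1 hc
                have : (n * 10 + (n % 10 - 1)) % 10 = 9 := by omega
                omega
              rw [pvDfsA_eq hA1, hchnil]
              have hnolow := hbug hl0 (by omega) (by omega)
              simp
              omega
            · rw [if_neg hA, if_neg (show ¬ n * 10 + (n % 10 + 1) ≤ high from hB)]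
              simp
        · by_cases hl9 : n % 10 = 9
          · rw [if_neg (fun hc => hl0 hc.1), if_neg (show ¬ ((n % 10 : Int) < 9) by omega),
              if_pos (show (0:Int) < n % 10 by omega)]
            simp only [List.filter_nil, List.append_nil]
            by_cases hA : n * 10 + (n % 10 - 1) ≤ high
            · rw [if_pos ⟨hl9, hA⟩]
              simp only [List.flatMap_cons, List.flatMap_nil, List.append_nil]
              exact hchild (n % 10 - 1) (by omega) (by omega) (by omega)
            · rw [if_neg (fun hc => hA hc.2), if_neg hA,
                if_neg (show ¬ n * 10 + (n % 10 + 1) ≤ high by omega),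
                pvDfsB_nil (show high < n * 10 + (n % 10 - 1) by omega)]
              simp
          · rw [if_neg (fun hc => hl0 hc.1), if_neg (fun hc => hl9 hc.1),
              if_pos (show (0:Int) < n % 10 by omega), if_pos (show (n % 10 : Int) < 9 by omega)]
            rw [List.flatMap_append, List.filter_append]
            congr 1
            · by_cases hA : n * 10 + (n % 10 - 1) ≤ high
              · rw [if_pos hA]
                simp only [List.flatMap_cons, List.flatMap_nil, List.append_nil]
                exact hchild (n % 10 - 1) (by omega) (by omega) (by omega)
              · rw [if_neg hA, pvDfsB_nil (show high < n * 10 + (n % 10 - 1) by omega)]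
                simp
            · by_cases hB : n * 10 + (n % 10 + 1) ≤ high
              · rw [if_pos hB]
                simp only [List.flatMap_cons, List.flatMap_nil, List.append_nil]
                exact hchild (n % 10 + 1) (by omega) (by omega) (by omega)
              · rw [if_neg hB, pvDfsB_nil (show high < n * 10 + (n % 10 + 1) by omega)]
                simp
      rw [hhead, htail]


-- ===== VERDICT (by name: the statement is the Claim_ definition above) =====
theorem stepNum_spec : Claim_unchanged_stepNum := by
  intro low high hDom hD
  -- domain bound: |high| ≤ 2^31, hence Nat.log 10 high.toNat ≤ 9
  have hDints : high ≤ 2147483648 := by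
    simp only [Dom_stepNum, pvDomInt, Bool.and_eq_true, decide_eq_true_eq] at hDom
    exact hDom.2.2
  have hLL : Nat.log 10 high.toNat ≤ 9 := by
    rcases Nat.eq_zero_or_pos high.toNat with h | h
    · rw [h]; simp
    · have h10 : high.toNat < 10 ^ 10 := by
        have : (10:Nat) ^ 10 = 10000000000 := by norm_num
        omega
      have := Nat.log_lt_of_lt_pow (by omega : high.toNat ≠ 0) h10
      omega
  have hseeds : PySem.List.pyRange 1 10 1 = [1, 2, 3, 4, 5, 6, 7, 8, 9] := by decide
  have hpos : ∀ e ∈ ([1, 2, 3, 4, 5, 6, 7, 8, 9] : List Int), 1 ≤ e := by decide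
  have hInv : pvInv [1, 2, 3, 4, 5, 6, 7, 8, 9] := by
    refine ⟨by decide, hpos, ?_⟩
    intro h t heq e he
    injection heq with h1 h2
    subst h1; subst h2
    have : e ∈ ([2, 3, 4, 5, 6, 7, 8, 9] : List Int) := he
    have h10 : (10:Int) * 1 + 1 % 10 - 1 = 10 := by decide
    rw [h10]
    simp only [List.mem_cons, List.not_mem_nil, or_false] at this
    rcases this with rfl | rfl | rfl | rfl | rfl | rfl | rfl | rfl <;> decide
  have hMQ : pvMQ high [1, 2, 3, 4, 5, 6, 7, 8, 9] ≤ 3 ^ 40 := by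
    have hwt : ∀ i : Int, 3 ^ pvWt high i ≤ 3 ^ 21 :=
      fun i => Nat.pow_le_pow_right (by norm_num) (by unfold pvWt; omega)
    have h1 := hwt 1; have h2 := hwt 2; have h3 := hwt 3; have h4 := hwt 4
    have h5 := hwt 5; have h6 := hwt 6; have h7 := hwt 7; have h8 := hwt 8
    have h9 := hwt 9
    have hbig : 9 * 3 ^ 21 ≤ 3 ^ 40 := by norm_num
    simp only [pvMQ, List.map_cons, List.map_nil, List.sum_cons, List.sum_nil]
    omega
  have hperm := pvVisit_perm high (3 ^ 40) _ hpos hMQ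
  have hsorted := pvVisit_sorted high (3 ^ 40) _ hInv
  -- B's fuelled DFS agrees with the ideal one
  have hgo : ∀ i : Int, 1 ≤ i → pvGo high (3 ^ 40) i = pvDfsB high i := by
    intro i hi
    apply pvGo_eq high _ i hi
    have h40 : (11:Nat) ≤ 3 ^ 40 := by norm_num
    omega
  -- node-for-node equality of recorded keys (uses ¬D_)
  have hnode : ∀ i : Int, 1 ≤ i → i ≤ 9 →
      (pvDfsA high i).filter (fun m => decide (low ≤ m ∧ m ≤ high)) =
        (pvDfsB high i).filter (fun m => decide (low ≤ m)) :=
    fun i hi hi9 => pvNode_eq hD (high + 1 - i).toNat i le_rfl hi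
      (pvStepping_small (by omega) (by omega))
  -- the recorded-key lists agree
  have e1 : (([1, 2, 3, 4, 5, 6, 7, 8, 9] : List Int)).flatMap (fun i => pvGo high (3 ^ 40) i) =
      (([1, 2, 3, 4, 5, 6, 7, 8, 9] : List Int)).flatMap (pvDfsB high) := by
    simp only [List.flatMap_cons, List.flatMap_nil]
    rw [hgo 1 (by norm_num), hgo 2 (by norm_num), hgo 3 (by norm_num), hgo 4 (by norm_num),
      hgo 5 (by norm_num), hgo 6 (by norm_num), hgo 7 (by norm_num), hgo 8 (by norm_num),
      hgo 9 (by norm_num)]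
  have e2 : ((([1, 2, 3, 4, 5, 6, 7, 8, 9] : List Int)).flatMap (pvDfsA high)).filter
        (fun m => decide (low ≤ m ∧ m ≤ high)) =
      ((([1, 2, 3, 4, 5, 6, 7, 8, 9] : List Int)).flatMap (pvDfsB high)).filter (fun m => decide (low ≤ m)) := by
    rw [List.filter_flatMap, List.filter_flatMap]
    simp only [List.flatMap_cons, List.flatMap_nil]
    rw [hnode 1 (by norm_num) (by norm_num), hnode 2 (by norm_num) (by norm_num),
      hnode 3 (by norm_num) (by norm_num), hnode 4 (by norm_num) (by norm_num),
      hnode 5 (by norm_num) (by norm_num), hnode 6 (by norm_num) (by norm_num),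
      hnode 7 (by norm_num) (by norm_num), hnode 8 (by norm_num) (by norm_num),
      hnode 9 (by norm_num) (by norm_num)]
  have hKperm : ((pvVisit high (3 ^ 40) [1, 2, 3, 4, 5, 6, 7, 8, 9]).filter (fun m => decide (low ≤ m ∧ m ≤ high))).Perm
      ((PySem.List.sorted ((([1, 2, 3, 4, 5, 6, 7, 8, 9] : List Int)).flatMap (fun i => pvGo high (3 ^ 40) i))
          (fun x => x) false).filter (fun m => decide (low ≤ m))) := by
    refine ((hperm.filter _).trans ?_).trans
      ((PySem.List.sorted_perm _ (fun x => x) false).filter _).symm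
    rw [e1, e2]
  have hKlt := hsorted.filter (fun m => decide (low ≤ m ∧ m ≤ high))
  have hSle : ((PySem.List.sorted ((([1, 2, 3, 4, 5, 6, 7, 8, 9] : List Int)).flatMap (fun i => pvGo high (3 ^ 40) i))
      (fun x => x) false).filter (fun m => decide (low ≤ m))).Pairwise (· ≤ ·) :=
    (PySem.List.sorted_pairwise _ _).filter _
  have hSnd : ((PySem.List.sorted ((([1, 2, 3, 4, 5, 6, 7, 8, 9] : List Int)).flatMap (fun i => pvGo high (3 ^ 40) i))
      (fun x => x) false).filter (fun m => decide (low ≤ m))).Pairwise (· ≠ ·) :=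
    hKperm.nodup (hKlt.imp fun hab => ne_of_lt hab)
  have hKeys : (pvVisit high (3 ^ 40) [1, 2, 3, 4, 5, 6, 7, 8, 9]).filter (fun m => decide (low ≤ m ∧ m ≤ high)) =
      (PySem.List.sorted ((([1, 2, 3, 4, 5, 6, 7, 8, 9] : List Int)).flatMap (fun i => pvGo high (3 ^ 40) i))
        (fun x => x) false).filter (fun m => decide (low ≤ m)) :=
    hKperm.eq_of_pairwise (fun _ _ _ _ h1 h2 => absurd h1 (not_lt.2 h2.le)) hKlt
      ((hSle.and hSnd).imp fun h => lt_of_le_of_ne h.1 h.2)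
  simp only [stepNum, stepNum_alt, hseeds]
  rw [pvBfs_foldl low high, pvFoldl_filter (fun n => low ≤ n ∧ n ≤ high) pvDigitSum,
    pvFoldl_filter (fun n => n ≥ low) pvDigitSum]
  simp only [ge_iff_le]
  rw [hKeys]

-- ===== lemmas for the tightness theorem =====

theorem pvGet_foldl (f : Int → Int) : ∀ (l : List Int) (r : PySem.Dict Int Int) (k : Int),
    (l.foldl (fun d n => d.insert n (f n)) r).get? k = if k ∈ l then some (f k) else r.get? k := by
  intro l
  induction l with
  | nil => intro r k; simp
  | cons a l ih =>
    intro r k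
    simp only [List.foldl_cons, ih, List.mem_cons]
    by_cases hkl : k ∈ l
    · simp [hkl]
    · by_cases hka : k = a
      · subst hka; simp [hkl, PySem.Dict.get?_insert_self]
      · simp [hkl, hka, PySem.Dict.get?_insert_of_ne r (f a) hka]

theorem pvDfsA_mem_self {high n : Int} (h : 1 ≤ n) : n ∈ pvDfsA high n := by
  rw [pvDfsA_eq h]; exact List.mem_cons_self

theorem pvDfsA_mem_child {high : Int} : ∀ (k : Nat) (s p c : Int), (high + 1 - s).toNat ≤ k →
    1 ≤ s → p ∈ pvDfsA high s → c ∈ pvCh high p → c ∈ pvDfsA high s := by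
  intro k
  induction k with
  | zero =>
    intro s p c hk hs hp hc
    have hsh : high < s := by omega
    rw [pvDfsA_eq hs, pvCh_nil hs hsh] at hp
    simp at hp
    subst hp
    rw [pvCh_nil hs hsh] at hc
    simp at hc
  | succ k ih =>
    intro s p c hk hs hp hc
    rw [pvDfsA_eq hs] at hp
    rcases List.mem_cons.1 hp with rfl | hp
    · rw [pvDfsA_eq hs]
      refine List.mem_cons_of_mem _ (List.mem_flatMap.2 ⟨c, hc, pvDfsA_mem_self ?_⟩)
      have hf := pvCh_facts hs hc
      have h0 : 0 ≤ p % 10 := Int.emod_nonneg p (by norm_num)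
      omega
    · obtain ⟨t, ht, hpt⟩ := List.mem_flatMap.1 hp
      have hf := pvCh_facts hs ht
      have h0 : 0 ≤ s % 10 := Int.emod_nonneg s (by norm_num)
      have hc' : c ∈ pvDfsA high t := ih t p c (by omega) (by omega) hpt hc
      rw [pvDfsA_eq hs]
      exact List.mem_cons_of_mem _ (List.mem_flatMap.2 ⟨t, ht, hc'⟩)

theorem pvCh_mem_of_child {high p : Int} (_hp : 1 ≤ p) {d : Int} (hd0 : 0 ≤ d) (hd9 : d ≤ 9)
    (hadj : d + 1 = p % 10 ∨ p % 10 + 1 = d) (hle : p * 10 + d ≤ high) :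
    p * 10 + d ∈ pvCh high p := by
  have hm : PySem.Int.mod p 10 = p % 10 := PySem.Int.mod_eq_emod_of_pos (by norm_num)
  have h0 : 0 ≤ p % 10 := Int.emod_nonneg p (by norm_num)
  have h9 : p % 10 < 10 := Int.emod_lt_of_pos p (by norm_num)
  simp only [pvCh, hm]
  by_cases hl0 : p % 10 = 0
  · have hd : d = 1 := by omega
    subst hd
    rw [if_pos ⟨hl0, by omega⟩]
    simp
    omega
  · by_cases hl9 : p % 10 = 9
    · have hd : d = 8 := by omega
      subst hd
      rw [if_neg (fun hcon => hl0 hcon.1), if_pos ⟨hl9, by omega⟩]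
      simp
      omega
    · rw [if_neg (fun hcon => hl0 hcon.1), if_neg (fun hcon => hl9 hcon.1)]
      rcases hadj with h | h
      · apply List.mem_append_left
        rw [if_pos (show p * 10 + (p % 10 - 1) ≤ high by omega)]
        simp
        omega
      · apply List.mem_append_right
        rw [if_pos (show p * 10 + (p % 10 + 1) ≤ high by omega)]
        simp
        omega

theorem pvReach {high : Int} : ∀ (k : Nat) (n : Int), n.toNat ≤ k → 1 ≤ n → n ≤ high →
    pvStepping n.toNat = true →
    n ∈ (([1, 2, 3, 4, 5, 6, 7, 8, 9] : List Int)).flatMap (pvDfsA high) := by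
  intro k
  induction k with
  | zero => intro n hk h1 _ _; omega
  | succ k ih =>
    intro n hk h1 hh hs
    by_cases hn10 : n < 10
    · refine List.mem_flatMap.2 ⟨n, ?_, pvDfsA_mem_self h1⟩
      simp only [List.mem_cons, List.not_mem_nil, or_false]
      omega
    · have hstep := pvStepping_step (n := n.toNat) (by omega)
      rw [hs] at hstep
      have hstep' := hstep.symm
      rw [Bool.and_eq_true] at hstep'
      obtain ⟨hdist, hsp⟩ := hstep'
      have hdist' : (n.toNat / 10 % 10).dist (n.toNat % 10) = 1 := by
        simpa using hdist
      have hpt : (n / 10).toNat = n.toNat / 10 := by omega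
      have hps : pvStepping ((n / 10)).toNat = true := by rw [hpt]; exact hsp
      have hmem := ih (n / 10) (by omega) (by omega) (by omega) hps
      have hadj : n % 10 + 1 = (n / 10) % 10 ∨ (n / 10) % 10 + 1 = n % 10 := by
        simp only [Nat.dist] at hdist'
        omega
      have hp1 : (1:Int) ≤ n / 10 := by omega
      have hd0' : (0:Int) ≤ n % 10 := by omega
      have hd9' : n % 10 ≤ (9:Int) := by omega
      have hle' : n / 10 * 10 + n % 10 ≤ high := by omega
      have hchld := pvCh_mem_of_child (p := n / 10) (d := n % 10) hp1 hd0' hd9' hadj hle'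
      rw [show n / 10 * 10 + n % 10 = n by omega] at hchld
      obtain ⟨s, hsm, hp⟩ := List.mem_flatMap.1 hmem
      have hs1 : 1 ≤ s := by
        simp only [List.mem_cons, List.not_mem_nil, or_false] at hsm
        omega
      exact List.mem_flatMap.2
        ⟨s, hsm, pvDfsA_mem_child (high + 1 - s).toNat s (n / 10) n le_rfl hs1 hp hchld⟩

theorem pvDfsB_all_stepping {high : Int} : ∀ (k : Nat) (n : Int), (high + 1 - n).toNat ≤ k →
    1 ≤ n → pvStepping n.toNat = true → ∀ c ∈ pvDfsB high n, pvStepping c.toNat = true := by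
  intro k
  induction k with
  | zero =>
    intro n hk h1 _ c hc
    rw [pvDfsB_nil (by omega)] at hc
    simp at hc
  | succ k ih =>
    intro n hk h1 hs c hc
    have h0 : 0 ≤ n % 10 := Int.emod_nonneg n (by norm_num)
    have h9 : n % 10 < 10 := Int.emod_lt_of_pos n (by norm_num)
    by_cases hgate : n < 1 ∨ high < n
    · rw [pvDfsB, if_pos hgate] at hc; simp at hc
    · rw [pvDfsB, if_neg hgate] at hc
      rcases List.mem_cons.1 hc with rfl | hc'
      · exact hs
      · rcases List.mem_append.1 hc' with h | h
        · by_cases hl : (0:Int) < n % 10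
          · rw [if_pos hl, show n * 10 + n % 10 - 1 = n * 10 + (n % 10 - 1) by ring] at h
            exact ih (n * 10 + (n % 10 - 1)) (by omega) (by omega)
              (pvStepping_child h1 hs (by omega) (by omega) (by omega)) c h
          · rw [if_neg hl] at h; simp at h
        · by_cases hl : (n % 10 : Int) < 9
          · rw [if_pos hl, show n * 10 + n % 10 + 1 = n * 10 + (n % 10 + 1) by ring] at h
            exact ih (n * 10 + (n % 10 + 1)) (by omega) (by omega)
              (pvStepping_child h1 hs (by omega) (by omega) (by omega)) c h
          · rw [if_neg hl] at h; simp at h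

theorem pvBogus_not_stepping {m : Int} (h10 : 10 ≤ m) (h0 : m % 10 = 0) :
    pvStepping (10 * m - 1).toNat = false := by
  have h1 : (10 * m - 1).toNat % 10 = 9 := by omega
  have h2 : (10 * m - 1).toNat / 10 % 10 = 9 := by omega
  rw [pvStepping_step (by omega), h1, h2]
  simp [Nat.dist]


theorem stepNum_changed : Claim_changed_stepNum := by
  unfold Claim_changed_stepNum; decide

theorem stepNum_tight : Claim_exact_stepNum := by
  intro low high hDom hD heq
  have hmh : PySem.Int.mod high 10 = high % 10 := PySem.Int.mod_eq_emod_of_pos (by norm_num)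
  have hfd : PySem.Int.floordiv (high + 1) 10 = (high + 1) / 10 :=
    PySem.Int.floordiv_eq_ediv_of_pos (by norm_num)
  unfold D_stepNum at hD
  rw [hmh, hfd] at hD
  obtain ⟨hor, hm10, hmm0, hms, hlow⟩ := hD
  rw [show PySem.Int.mod ((high + 1) / 10) 10 = ((high + 1) / 10) % 10 from
    PySem.Int.mod_eq_emod_of_pos (by norm_num)] at hmm0
  set M := (high + 1) / 10 with hMdef
  have hhc : high = 10 * M - 1 ∨ high = 10 * M := by omega
  have hDints : high ≤ 2147483648 := by
    simp only [Dom_stepNum, pvDomInt, Bool.and_eq_true, decide_eq_true_eq] at hDom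
    exact hDom.2.2
  have hLL : Nat.log 10 high.toNat ≤ 9 := by
    rcases Nat.eq_zero_or_pos high.toNat with h | h
    · rw [h]; simp
    · have h10 : high.toNat < 10 ^ 10 := by
        have : (10:Nat) ^ 10 = 10000000000 := by norm_num
        omega
      have := Nat.log_lt_of_lt_pow (by omega : high.toNat ≠ 0) h10
      omega
  have hseeds : PySem.List.pyRange 1 10 1 = [1, 2, 3, 4, 5, 6, 7, 8, 9] := by decide
  have hpos : ∀ e ∈ ([1, 2, 3, 4, 5, 6, 7, 8, 9] : List Int), 1 ≤ e := by decide
  have hMQ : pvMQ high [1, 2, 3, 4, 5, 6, 7, 8, 9] ≤ 3 ^ 40 := by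
    have hwt : ∀ i : Int, 3 ^ pvWt high i ≤ 3 ^ 21 :=
      fun i => Nat.pow_le_pow_right (by norm_num) (by unfold pvWt; omega)
    have h1 := hwt 1; have h2 := hwt 2; have h3 := hwt 3; have h4 := hwt 4
    have h5 := hwt 5; have h6 := hwt 6; have h7 := hwt 7; have h8 := hwt 8
    have h9 := hwt 9
    have hbig : 9 * 3 ^ 21 ≤ 3 ^ 40 := by norm_num
    simp only [pvMQ, List.map_cons, List.map_nil, List.sum_cons, List.sum_nil]
    omega
  have hperm := pvVisit_perm high (3 ^ 40) _ hpos hMQ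
  have hgo : ∀ i : Int, 1 ≤ i → pvGo high (3 ^ 40) i = pvDfsB high i := by
    intro i hi
    apply pvGo_eq high _ i hi
    have h40 : (11:Nat) ≤ 3 ^ 40 := by norm_num
    omega
  have e1 : (([1, 2, 3, 4, 5, 6, 7, 8, 9] : List Int)).flatMap (fun i => pvGo high (3 ^ 40) i) =
      (([1, 2, 3, 4, 5, 6, 7, 8, 9] : List Int)).flatMap (pvDfsB high) := by
    simp only [List.flatMap_cons, List.flatMap_nil]
    rw [hgo 1 (by norm_num), hgo 2 (by norm_num), hgo 3 (by norm_num), hgo 4 (by norm_num),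
      hgo 5 (by norm_num), hgo 6 (by norm_num), hgo 7 (by norm_num), hgo 8 (by norm_num),
      hgo 9 (by norm_num)]
  simp only [stepNum, stepNum_alt, hseeds] at heq
  rw [pvBfs_foldl low high, pvFoldl_filter (fun n => low ≤ n ∧ n ≤ high) pvDigitSum,
    pvFoldl_filter (fun n => n ≥ low) pvDigitSum] at heq
  have hdict := PySem.Dict.ext_iff.mpr heq
  have hget := congrArg (fun d => d.get? (10 * M - 1)) hdict
  simp only at hget
  rw [pvGet_foldl, pvGet_foldl] at hget
  have hMre : M ∈ (([1, 2, 3, 4, 5, 6, 7, 8, 9] : List Int)).flatMap (pvDfsA high) :=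
    pvReach M.toNat M le_rfl (by omega) (by omega) hms
  have hbch : 10 * M - 1 ∈ pvCh high M := by
    have hm2 : PySem.Int.mod M 10 = M % 10 := PySem.Int.mod_eq_emod_of_pos (by norm_num)
    simp only [pvCh, hm2]
    rw [if_neg (show ¬ (M % 10 = 0 ∧ M * 10 + (M % 10 + 1) ≤ high) by omega),
      if_neg (show ¬ (M % 10 = 9 ∧ M * 10 + (M % 10 - 1) ≤ high) by omega)]
    apply List.mem_append_left
    rw [if_pos (show M * 10 + (M % 10 - 1) ≤ high by omega)]
    simp
    omega
  have hbA : (10 * M - 1) ∈ (pvVisit high (3 ^ 40) [1, 2, 3, 4, 5, 6, 7, 8, 9]).filter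
      (fun m => decide (low ≤ m ∧ m ≤ high)) := by
    apply List.mem_filter.2
    refine ⟨(hperm.mem_iff).2 ?_, by simp only [decide_eq_true_eq]; omega⟩
    obtain ⟨s, hsm, hMp⟩ := List.mem_flatMap.1 hMre
    have hs1 : 1 ≤ s := by
      simp only [List.mem_cons, List.not_mem_nil, or_false] at hsm
      omega
    exact List.mem_flatMap.2
      ⟨s, hsm, pvDfsA_mem_child (high + 1 - s).toNat s M (10 * M - 1) le_rfl hs1 hMp hbch⟩
  have hbB : (10 * M - 1) ∉ (PySem.List.sorted ((([1, 2, 3, 4, 5, 6, 7, 8, 9] : List Int)).flatMap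
      (fun i => pvGo high (3 ^ 40) i)) (fun x => x) false).filter
      (fun m => decide (low ≤ m)) := by
    intro hmem
    have h1 := (List.mem_filter.1 hmem).1
    rw [PySem.List.mem_sorted, e1] at h1
    obtain ⟨s, hsm, hcs⟩ := List.mem_flatMap.1 h1
    have hs1 : 1 ≤ s ∧ s ≤ 9 := by
      simp only [List.mem_cons, List.not_mem_nil, or_false] at hsm
      omega
    have hst := pvDfsB_all_stepping (high + 1 - s).toNat s le_rfl hs1.1
      (pvStepping_small (by omega) (by omega)) _ hcs
    have hfalse := pvBogus_not_stepping (m := M) (by omega) (by omega)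
    rw [hst] at hfalse
    cases hfalse
  rw [if_pos hbA, if_neg hbB] at hget
  have hr0 : (if low = 0 then (PySem.Dict.empty : PySem.Dict Int Int).insert 0 0
      else PySem.Dict.empty).get? (10 * M - 1) = none := by
    by_cases hl0 : low = 0
    · rw [if_pos hl0, PySem.Dict.get?_insert_of_ne _ _ (by omega : (10 * M - 1 : Int) ≠ 0)]
      exact PySem.Dict.get?_empty _
    · rw [if_neg hl0]
      exact PySem.Dict.get?_empty _
  rw [hr0] at hget
  simp at hget
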